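-- pv_equiv track=rewrite | github.com/andxeg/qBraid_GPU4Quantum_Challenge_2025 | gpt-qaoa/inference.py | get_max_token_count_qiskit
-- ===== SOURCE A (Python) =====
-- def get_max_token_count_qiskit(n: int) -> int:
--     token_map = {
--         5: 1386,
--         10: 3465,
--         15: 6930,
--         20: 12127,
--         25: 18018,
--         30: 24255
--     }
--
--     sorted_keys = sorted(token_map.keys())
--     for k in sorted_keys:
--         if n <= k:
--             return token_map[k]
--
--     # If n is greater than all keys, use the largest
--     return token_map[sorted_keys[-1]]
-- ===== SOURCE B (Python) =====
-- # B: binary search (hand-written bisect_left) over two aligned constant lists,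
-- # replacing A's dict construction + sorted() + linear scan.
-- _THRESH = [5, 10, 15, 20, 25, 30]
-- _VALS = [1386, 3465, 6930, 12127, 18018, 24255]
--
--
-- def get_max_token_count_qiskit(n: int) -> int:
--     lo, hi = 0, len(_THRESH)
--     while lo < hi:
--         mid = (lo + hi) // 2
--         if _THRESH[mid] < n:
--             lo = mid + 1
--         else:
--             hi = mid
--     return _VALS[min(lo, len(_VALS) - 1)]
-- ===== Notes on version B (the rewrite author's own statement) =====
-- stated objective: alternative
-- what changed: Replaces A's dict build + sorted(keys) + linear first-match scan by a hand-written bisect_left binary search over two aligned constant lists, clamping the index to the last entry for n above all thresholds.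
import Mathlib
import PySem

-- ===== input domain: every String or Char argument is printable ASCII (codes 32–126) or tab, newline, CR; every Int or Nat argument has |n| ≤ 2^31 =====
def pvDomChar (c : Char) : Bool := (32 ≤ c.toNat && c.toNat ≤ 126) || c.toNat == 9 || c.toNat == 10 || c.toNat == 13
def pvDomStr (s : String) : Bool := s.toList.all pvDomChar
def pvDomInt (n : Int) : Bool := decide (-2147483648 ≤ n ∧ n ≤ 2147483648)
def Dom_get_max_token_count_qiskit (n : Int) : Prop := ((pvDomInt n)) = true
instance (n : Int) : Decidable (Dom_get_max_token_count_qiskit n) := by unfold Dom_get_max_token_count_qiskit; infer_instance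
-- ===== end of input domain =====

-- B replaces A's dict + sorted keys + linear scan by a binary search over two aligned
-- constant lists (alternative decomposition; not claimed faster).

-- ===== PORT A =====
-- A: token_map dict, sorted keys, first k with n <= k; fall through to largest key.
def pvTokenMap : PySem.Dict Int Int :=
  PySem.Dict.ofList [(5, 1386), (10, 3465), (15, 6930), (20, 12127), (25, 18018), (30, 24255)]

-- the 'for k in sorted_keys: if n <= k: return token_map[k]' loop
-- (token_map[k] never raises here: every k comes from token_map's keys; getD 0 marks that case)
def pvLoopA (n : Int) : List Int → Option Int
  | [] => none
  | k :: ks => if n ≤ k then some ((PySem.Dict.get? pvTokenMap k).getD 0) else pvLoopA n ks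

def get_max_token_count_qiskit (n : Int) : Int :=
  let sorted_keys := PySem.List.sorted (PySem.Dict.keys pvTokenMap) (fun k => k)
  match pvLoopA n sorted_keys with
  | some v => v
  | none => (PySem.Dict.get? pvTokenMap ((PySem.List.pyGet? sorted_keys (-1)).getD 0)).getD 0

-- ===== PORT B =====
def pvThresh : List Int := [5, 10, 15, 20, 25, 30]
def pvVals : List Int := [1386, 3465, 6930, 12127, 18018, 24255]

-- hand-written bisect_left loop from Source B, as recursion on hi - lo
def pvBisect (n : Int) (lo hi : Nat) : Nat :=
  if h : lo < hi then
    let mid := (lo + hi) / 2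
    if pvThresh.getD mid 0 < n then pvBisect n (mid + 1) hi else pvBisect n lo mid
  else lo
termination_by hi - lo
decreasing_by all_goals omega

def get_max_token_count_qiskit_alt (n : Int) : Int :=
  let lo := pvBisect n 0 pvThresh.length
  pvVals.getD (min lo (pvVals.length - 1)) 0

-- ===== PRECONDITION & SPEC =====
def Spec_get_max_token_count_qiskit (n : Int) (out : Int) : Prop := out = get_max_token_count_qiskit_alt n
instance (n : Int) (out : Int) : Decidable (Spec_get_max_token_count_qiskit n out) := by unfold Spec_get_max_token_count_qiskit; infer_instance

-- ===== CLAIM (what is proved, stated in full; the proofs are below) =====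
def Claim_equal_get_max_token_count_qiskit : Prop := ∀ (n : Int), Dom_get_max_token_count_qiskit n → Spec_get_max_token_count_qiskit n (get_max_token_count_qiskit n)

-- ===== LEMMAS AND PROOFS =====

-- common closed form of both programs: the bracket table
def tbl (n : Int) : Int :=
  if n ≤ 5 then 1386 else if n ≤ 10 then 3465 else if n ≤ 15 then 6930
  else if n ≤ 20 then 12127 else if n ≤ 25 then 18018 else 24255

theorem pvBisect_id (n : Int) (lo : Nat) : pvBisect n lo lo = lo := by
  rw [pvBisect]; simp

theorem pvBisect_01 (n : Int) : pvBisect n 0 1 = if 5 < n then 1 else 0 := by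
  rw [pvBisect]; norm_num [pvThresh, pvBisect_id]

theorem pvBisect_23 (n : Int) : pvBisect n 2 3 = if 15 < n then 3 else 2 := by
  rw [pvBisect]; norm_num [pvThresh, pvBisect_id]

theorem pvBisect_45 (n : Int) : pvBisect n 4 5 = if 25 < n then 5 else 4 := by
  rw [pvBisect]; norm_num [pvThresh, pvBisect_id]

theorem pvBisect_03 (n : Int) : pvBisect n 0 3
    = if 10 < n then (if 15 < n then 3 else 2) else (if 5 < n then 1 else 0) := by
  rw [pvBisect]; norm_num [pvThresh, pvBisect_23, pvBisect_01]

theorem pvBisect_46 (n : Int) : pvBisect n 4 6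
    = if 30 < n then 6 else (if 25 < n then 5 else 4) := by
  rw [pvBisect]; norm_num [pvThresh, pvBisect_45, pvBisect_id]

theorem pvBisect_06 (n : Int) : pvBisect n 0 6
    = if 20 < n then (if 30 < n then 6 else (if 25 < n then 5 else 4))
      else (if 10 < n then (if 15 < n then 3 else 2) else (if 5 < n then 1 else 0)) := by
  rw [pvBisect]; norm_num [pvThresh, pvBisect_46, pvBisect_03]

theorem alt_eq_tbl (n : Int) : get_max_token_count_qiskit_alt n = tbl n := by
  unfold get_max_token_count_qiskit_alt tbl
  simp only [show pvThresh.length = 6 from rfl, show pvVals.length = 6 from rfl, pvBisect_06]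
  split_ifs <;> first | rfl | omega

theorem a_eq_tbl (n : Int) : get_max_token_count_qiskit n = tbl n := by
  unfold get_max_token_count_qiskit tbl
  rw [show PySem.List.sorted (PySem.Dict.keys pvTokenMap) (fun k => k) = [5,10,15,20,25,30] by
    apply PySem.List.sorted_eq_of_perm_of_pairwise_lt
    · exact List.Perm.rfl
    · decide]
  simp only [pvLoopA,
    show (PySem.Dict.get? pvTokenMap 5).getD 0 = 1386 from rfl,
    show (PySem.Dict.get? pvTokenMap 10).getD 0 = 3465 from rfl,
    show (PySem.Dict.get? pvTokenMap 15).getD 0 = 6930 from rfl,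
    show (PySem.Dict.get? pvTokenMap 20).getD 0 = 12127 from rfl,
    show (PySem.Dict.get? pvTokenMap 25).getD 0 = 18018 from rfl,
    show (PySem.List.pyGet? ([5,10,15,20,25,30] : List Int) (-1)).getD 0 = 30 from rfl,
    show (PySem.Dict.get? pvTokenMap 30).getD 0 = 24255 from rfl]
  split_ifs <;> first | rfl | omega

-- ===== VERDICT (by name: the statement is the Claim_ definition above) =====
theorem get_max_token_count_qiskit_spec : Claim_equal_get_max_token_count_qiskit := by
  intro n _
  unfold Spec_get_max_token_count_qiskit
  rw [a_eq_tbl, alt_eq_tbl]
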